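-- pv_equiv track=rewrite | github.com/rkawa01/concurrency-theory-course | zadanie1/fnf.py | get_words_dependency_graph
-- ===== SOURCE A (Python) =====
-- def get_words_dependency_graph(D, w):
--     """
--     Creates a dependency graph for a word w.
--
--     :param D: dependency graph
--     :param w: word
--
--     :return: dependency graph for word w
--     """
--     w_dependence_graph = {}
--
--     for i in range(len(w)):
--         # Look from the right of letter at index i and create edges
--         x = w[i]
--         if x not in w_dependence_graph:
--             w_dependence_graph[i] = set()
--
--         for j in range(i+1, len(w)):
--             y = w[j]
--             if y in D[x]:
--                 w_dependence_graph[i].add(j)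
--
--     return w_dependence_graph
-- ===== SOURCE B (Python) =====
-- def get_words_dependency_graph(D, w):
--     n = len(w)
--     # inverted index: letter -> increasing list of its positions in w
--     letters2pos = {}
--     for i, c in enumerate(w):
--         letters2pos.setdefault(c, []).append(i)
--     g = {}
--     for i in range(n):
--         if i < n - 1:
--             pos = sorted(j for y in D[w[i]] for j in letters2pos.get(y, []) if j > i)
--             g[i] = set(pos)
--         else:
--             g[i] = set()
--     return g
-- ===== Notes on version B (the rewrite author's own statement) =====
-- stated objective: alternative
-- what changed: B builds an inverted index letter->positions in one pass and gathers each position's successors from the index via the letters of D[w[i]], instead of A's re-scan of the whole suffix with a list-membership test at every step; the last position's D-lookup is skipped exactly as A's empty inner loop skips it.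
import Mathlib
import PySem

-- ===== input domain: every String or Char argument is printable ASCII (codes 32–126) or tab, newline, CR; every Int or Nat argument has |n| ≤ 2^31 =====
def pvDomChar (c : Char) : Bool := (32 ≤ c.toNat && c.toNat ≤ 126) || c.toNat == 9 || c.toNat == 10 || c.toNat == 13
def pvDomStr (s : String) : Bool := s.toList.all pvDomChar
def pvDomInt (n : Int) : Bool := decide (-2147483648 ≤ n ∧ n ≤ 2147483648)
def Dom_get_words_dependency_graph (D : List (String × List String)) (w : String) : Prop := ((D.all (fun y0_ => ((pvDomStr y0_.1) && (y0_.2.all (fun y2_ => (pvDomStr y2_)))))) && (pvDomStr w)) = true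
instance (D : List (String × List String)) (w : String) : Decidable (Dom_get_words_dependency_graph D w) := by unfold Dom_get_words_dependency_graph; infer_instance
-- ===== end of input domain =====

-- B replaces A's per-position rescan of the whole suffix (one membership test per suffix letter)
-- by an inverted index letter → positions built once, gathering each position's successors from
-- the index; same return value (dict of sets) on every input admitted by Pre_.

-- ===== PORT A =====
def get_words_dependency_graph (D : List (String × List String)) (w : String) : List (Int × List Int) :=
  let cs := w.toList
  let n : Int := cs.length
  ((PySem.List.pyRange 0 n 1).foldl (fun g i =>
      let x := String.singleton (PySem.List.pyGetD cs i ' ')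
      -- Python's 'if x not in w_dependence_graph': x is a str while every key is an int,
      -- so the test is ALWAYS true in Python — ported as always taking the branch (exact).
      let g := g.insert i ([] : List Int)
      (PySem.List.pyRange (i + 1) n 1).foldl (fun g j =>
        let y := String.singleton (PySem.List.pyGetD cs j ' ')
        -- 'if y in D[x]': D[x] raises KeyError for a missing key — excluded by Pre_, where getD is exact
        if (((PySem.Dict.mk D).getD x []).contains y) then
          g.modify i [] (fun s => PySem.Set.add s j)
        else g) g)
    (PySem.Dict.empty : PySem.Dict Int (List Int))).items

-- ===== PORT B =====
def get_words_dependency_graph_alt (D : List (String × List String)) (w : String) : List (Int × List Int) :=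
  let cs := w.toList
  let n : Int := cs.length
  let letters2pos := (PySem.List.enumerate cs 0).foldl
      (fun d p => d.modify (String.singleton p.2) ([] : List Int) (fun l => l ++ [p.1]))
      (PySem.Dict.empty : PySem.Dict String (List Int))
  ((PySem.List.pyRange 0 n 1).foldl (fun g i =>
      if i < n - 1 then
        let x := String.singleton (PySem.List.pyGetD cs i ' ')
        let pos := PySem.List.sorted
          (((PySem.Dict.mk D).getD x []).flatMap
            (fun y => (letters2pos.getD y []).filter (fun j => decide (i < j))))
          (fun j => j) false
        g.insert i (PySem.Set.ofList pos)
      else g.insert i ([] : List Int))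
    (PySem.Dict.empty : PySem.Dict Int (List Int))).items

-- ===== PRECONDITION & SPEC =====
-- Pre_ excludes exactly the inputs where Python A raises KeyError: some letter of w other than
-- the last one (i.e. at a position i < len(w)-1) is not a key of D.
def Pre_get_words_dependency_graph (D : List (String × List String)) (w : String) : Prop :=
  (w.toList.dropLast.all (fun c => (PySem.Dict.mk D).contains (String.singleton c))) = true
instance (D : List (String × List String)) (w : String) : Decidable (Pre_get_words_dependency_graph D w) := by unfold Pre_get_words_dependency_graph; infer_instance

def pvWitness_get_words_dependency_graph : (List (String × List String)) × String :=
  ([("a", ["b", "a"]), ("b", [])], "abab")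

def Spec_get_words_dependency_graph (D : List (String × List String)) (w : String) (out : List (Int × List Int)) : Prop := out = get_words_dependency_graph_alt D w
instance (D : List (String × List String)) (w : String) (out : List (Int × List Int)) : Decidable (Spec_get_words_dependency_graph D w out) := by unfold Spec_get_words_dependency_graph; infer_instance

-- ===== CLAIM (what is proved, stated in full; the proofs are below) =====
def Claim_equal_get_words_dependency_graph : Prop := ∀ (D : List (String × List String)) (w : String), Dom_get_words_dependency_graph D w → Pre_get_words_dependency_graph D w → Spec_get_words_dependency_graph D w (get_words_dependency_graph D w)

-- ===== LEMMAS AND PROOFS =====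

-- D[w[i]] as both ports look it up
def pvDx (D : List (String × List String)) (cs : List Char) (i : Int) : List String :=
  (PySem.Dict.mk D).getD (String.singleton (PySem.List.pyGetD cs i ' ')) []
def pvSA (D : List (String × List String)) (cs : List Char) (i : Int) : List Int :=
  (PySem.List.pyRange (i + 1) (cs.length : Int) 1).foldl (fun s j =>
    if (pvDx D cs i).contains (String.singleton (PySem.List.pyGetD cs j ' ')) then
      PySem.Set.add s j
    else s) []
def pvIdx (cs : List Char) : PySem.Dict String (List Int) :=
  (PySem.List.enumerate cs 0).foldl
    (fun d p => d.modify (String.singleton p.2) ([] : List Int) (fun l => l ++ [p.1]))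
    (PySem.Dict.empty : PySem.Dict String (List Int))
def pvSB (D : List (String × List String)) (cs : List Char) (i : Int) : List Int :=
  if i < (cs.length : Int) - 1 then
    PySem.Set.ofList (PySem.List.sorted
      ((pvDx D cs i).flatMap (fun y => ((pvIdx cs).getD y []).filter (fun j => decide (i < j))))
      (fun j => j) false)
  else []
theorem pv_fold_add_filter (p : Int → Bool) (l : List Int) (acc : List Int)
    (hnd : l.Nodup) (hfresh : ∀ j ∈ l, j ∉ acc) :
    l.foldl (fun s j => if p j then PySem.Set.add s j else s) acc = acc ++ l.filter p := by
  induction l generalizing acc with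
  | nil => simp
  | cons a t ih =>
    rcases List.nodup_cons.mp hnd with ⟨ha, hnt⟩
    simp only [List.foldl_cons, List.filter_cons]
    by_cases hp : p a
    · have hna : a ∉ acc := hfresh a (by simp)
      have hadd : PySem.Set.add acc a = acc ++ [a] := by
        simp [PySem.Set.add, hna]
      have hfresh' : ∀ j ∈ t, j ∉ acc ++ [a] := by
        intro j hj
        simp only [List.mem_append, List.mem_singleton]
        rintro (h | rfl)
        · exact hfresh j (List.mem_cons_of_mem _ hj) h
        · exact ha hj
      rw [if_pos hp, hadd, ih (acc ++ [a]) hnt hfresh', hp]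
      simp
    · rw [if_neg hp, ih acc hnt (fun j hj => hfresh j (List.mem_cons_of_mem _ hj))]
      simp [hp]

theorem pv_fold_modify_insert (l : List Int) (g : PySem.Dict Int (List Int)) (i : Int)
    (p : Int → Bool) (s : List Int) :
    l.foldl (fun g j => if p j then g.modify i [] (fun t => PySem.Set.add t j) else g) (g.insert i s)
      = g.insert i (l.foldl (fun t j => if p j then PySem.Set.add t j else t) s) := by
  induction l generalizing s with
  | nil => simp
  | cons a t ih =>
    simp only [List.foldl_cons]
    by_cases hp : p a
    · rw [if_pos hp, if_pos hp]
      have : (g.insert i s).modify i [] (fun t => PySem.Set.add t a)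
          = g.insert i (PySem.Set.add s a) := by
        simp [PySem.Dict.modify, PySem.Dict.getD_insert_self, PySem.Dict.insert_insert_self]
      rw [this, ih]
    · rw [if_neg hp, if_neg hp, ih]

theorem pv_foldl_add_sublist (xs s : List Int) :
    (xs.foldl PySem.Set.add s).Sublist (s ++ xs) := by
  induction xs generalizing s with
  | nil => simp
  | cons a t ih =>
    simp only [List.foldl_cons]
    by_cases h : s.contains a
    · have hmem : a ∈ s := by simpa using h
      have : PySem.Set.add s a = s := by simp [PySem.Set.add, hmem]
      rw [this]
      exact (ih s).trans (by simp)
    · have hmem : a ∉ s := by simpa using h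
      have : PySem.Set.add s a = s ++ [a] := by simp [PySem.Set.add, hmem]
      rw [this]
      simpa using ih (s ++ [a])

theorem pv_ofList_sublist (xs : List Int) : (PySem.Set.ofList xs).Sublist xs := by
  have := pv_foldl_add_sublist xs []
  simpa [PySem.Set.ofList_eq_foldl] using this

theorem pv_mem_enumerate (cs : List Char) (s : Int) (p : Int × Char) :
    p ∈ PySem.List.enumerate cs s ↔
      ∃ k : Nat, ∃ _ : k < cs.length, p.1 = s + k ∧ p.2 = cs[k] := by
  induction cs generalizing s with
  | nil => simp [PySem.List.enumerate_nil]
  | cons c t ih =>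
    rw [PySem.List.enumerate_cons, List.mem_cons, ih]
    constructor
    · rintro (rfl | ⟨k, hk, h1, h2⟩)
      · exact ⟨0, by simp, by simp⟩
      · exact ⟨k + 1, by simp only [List.length_cons]; omega, by rw [h1]; push_cast; ring, by simpa using h2⟩
    · rintro ⟨k, hk, h1, h2⟩
      cases k with
      | zero =>
        left
        simp at h2 h1
        rw [Prod.ext_iff]; exact ⟨by omega, h2⟩
      | succ m =>
        right
        exact ⟨m, by simp only [List.length_cons] at hk; omega, by rw [h1]; push_cast; ring, by simpa using h2⟩

theorem pv_idx_getD (cs : List Char) (y : String) :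
    (pvIdx cs).getD y []
    = (((PySem.List.enumerate cs 0).filter (fun p => String.singleton p.2 == y)).map (fun p => p.1)) := by
  unfold pvIdx
  have key : (PySem.List.enumerate cs 0).foldl
      (fun d p => d.modify (String.singleton p.2) ([] : List Int) (fun l => l ++ [p.1]))
      (PySem.Dict.empty : PySem.Dict String (List Int))
    = ((PySem.List.enumerate cs 0).map (fun p : Int × Char => (String.singleton p.2, p.1))).foldl
        (fun d q => d.modify q.1 ([] : List Int) (fun l => l ++ [q.2])) PySem.Dict.empty := by
    rw [List.foldl_map]
  rw [key, PySem.Dict.getD_foldl_modify_append]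
  simp [List.filter_map, Function.comp_def]

theorem pv_idx_mem (cs : List Char) (y : String) (j : Int) :
    j ∈ (pvIdx cs).getD y [] ↔
      ∃ k : Nat, ∃ _ : k < cs.length, j = (k : Int) ∧ String.singleton cs[k] = y := by
  rw [pv_idx_getD]
  simp only [List.mem_map, List.mem_filter, pv_mem_enumerate]
  constructor
  · rintro ⟨p, ⟨⟨k, hk, h1, h2⟩, hy⟩, rfl⟩
    exact ⟨k, hk, by omega, by rw [← h2]; exact (beq_iff_eq.mp hy)⟩
  · rintro ⟨k, hk, rfl, hy⟩
    exact ⟨((k : Int), cs[k]), ⟨⟨k, hk, by omega, rfl⟩, beq_iff_eq.mpr hy⟩, rfl⟩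

theorem pv_row_eq (D : List (String × List String)) (cs : List Char) (i : Int)
    (h0 : 0 ≤ i) (hn : i < (cs.length : Int)) : pvSA D cs i = pvSB D cs i := by
  by_cases hlt : i < (cs.length : Int) - 1
  · unfold pvSA pvSB
    rw [if_pos hlt]
    rw [pv_fold_add_filter _ _ [] (PySem.List.nodup_pyRange_one _ _) (by simp)]
    rw [List.nil_append]
    set L := ((pvDx D cs i).flatMap (fun y => ((pvIdx cs).getD y []).filter (fun j => decide (i < j)))) with hL
    set F := (PySem.List.pyRange (i + 1) (cs.length : Int) 1).filter
      (fun j => (pvDx D cs i).contains (String.singleton (PySem.List.pyGetD cs j ' '))) with hF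
    have hFpw : F.Pairwise (· < ·) := (PySem.List.pairwise_lt_pyRange_one _ _).filter _
    have hFnd : F.Nodup := hFpw.imp (fun h => ne_of_lt h)
    have hRsub := pv_ofList_sublist (PySem.List.sorted L (fun j => j) false)
    have hRpw : (PySem.Set.ofList (PySem.List.sorted L (fun j => j) false)).Pairwise (· ≤ ·) :=
      List.Pairwise.sublist hRsub (PySem.List.sorted_pairwise L (fun j => j))
    have hRnd := PySem.Set.nodup_ofList (PySem.List.sorted L (fun j => j) false)
    have hmem : ∀ a : Int, a ∈ F ↔ a ∈ PySem.Set.ofList (PySem.List.sorted L (fun j => j) false) := by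
      intro a
      rw [PySem.Set.mem_ofList, PySem.List.mem_sorted, hF, hL]
      rw [List.mem_filter, PySem.List.mem_pyRange_one, List.mem_flatMap]
      constructor
      · rintro ⟨⟨ha1, ha2⟩, hc⟩
        have hmemD : String.singleton (PySem.List.pyGetD cs a ' ') ∈ pvDx D cs i := by
          simpa using hc
        refine ⟨String.singleton (PySem.List.pyGetD cs a ' '), hmemD, ?_⟩
        rw [List.mem_filter, pv_idx_mem]
        have ha0 : 0 ≤ a := by omega
        refine ⟨⟨a.toNat, by omega, by omega, ?_⟩, by simp; omega⟩
        rw [PySem.List.pyGetD_eq_getElem cs ' ' ha0 ha2]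
      · rintro ⟨y, hy, hmemf⟩
        rw [List.mem_filter, pv_idx_mem] at hmemf
        rcases hmemf with ⟨⟨k, hk, rfl, hyk⟩, hgt⟩
        have hgt' : i < (k : Int) := by simpa using hgt
        refine ⟨⟨by omega, by omega⟩, ?_⟩
        have : PySem.List.pyGetD cs (k : Int) ' ' = cs[k] := by
          rw [PySem.List.pyGetD_eq_getElem cs ' ' (by omega) (by exact_mod_cast hk)]
          simp
        rw [this, hyk]
        simpa using hy
    have hperm := (List.perm_ext_iff_of_nodup hFnd hRnd).mpr hmem
    exact List.Perm.eq_of_pairwise (fun a b _ _ hab hba => le_antisymm hab hba)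
      (hFpw.imp (fun h => le_of_lt h)) hRpw hperm
  · unfold pvSA pvSB
    rw [if_neg hlt, PySem.List.pyRange_one_eq_nil (by omega)]
    simp

theorem pv_A_items (D : List (String × List String)) (w : String) :
    get_words_dependency_graph D w
      = (PySem.List.pyRange 0 (w.toList.length : Int) 1).map (fun i => (i, pvSA D w.toList i)) := by
  have hbody : (fun (g : PySem.Dict Int (List Int)) (i : Int) =>
      (PySem.List.pyRange (i + 1) (w.toList.length : Int) 1).foldl (fun g j =>
        if (pvDx D w.toList i).contains (String.singleton (PySem.List.pyGetD w.toList j ' ')) then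
          g.modify i [] (fun s => PySem.Set.add s j)
        else g) (g.insert i ([] : List Int)))
      = fun g i => g.insert i (pvSA D w.toList i) := by
    funext g i
    exact pv_fold_modify_insert _ g i _ []
  show (List.foldl (fun (g : PySem.Dict Int (List Int)) (i : Int) =>
      (PySem.List.pyRange (i + 1) (w.toList.length : Int) 1).foldl (fun g j =>
        if (pvDx D w.toList i).contains (String.singleton (PySem.List.pyGetD w.toList j ' ')) then
          g.modify i [] (fun s => PySem.Set.add s j)
        else g) (g.insert i ([] : List Int)))
      PySem.Dict.empty (PySem.List.pyRange 0 (w.toList.length : Int) 1)).items = _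
  rw [hbody]
  rw [PySem.Dict.items_foldl_insert_fresh _ (fun i => i) (pvSA D w.toList) _ (fun a _ => rfl)
    (by simpa using PySem.List.nodup_pyRange_one 0 (w.toList.length : Int))]
  rfl

theorem pv_B_items (D : List (String × List String)) (w : String) :
    get_words_dependency_graph_alt D w
      = (PySem.List.pyRange 0 (w.toList.length : Int) 1).map (fun i => (i, pvSB D w.toList i)) := by
  have hbody : (fun (g : PySem.Dict Int (List Int)) (i : Int) =>
      if i < (w.toList.length : Int) - 1 then
        g.insert i (PySem.Set.ofList (PySem.List.sorted
          ((pvDx D w.toList i).flatMap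
            (fun y => ((pvIdx w.toList).getD y []).filter (fun j => decide (i < j))))
          (fun j => j) false))
      else g.insert i ([] : List Int))
      = fun g i => g.insert i (pvSB D w.toList i) := by
    funext g i
    unfold pvSB
    exact (apply_ite (g.insert i) _ _ _).symm
  show (List.foldl (fun (g : PySem.Dict Int (List Int)) (i : Int) =>
      if i < (w.toList.length : Int) - 1 then
        g.insert i (PySem.Set.ofList (PySem.List.sorted
          ((pvDx D w.toList i).flatMap
            (fun y => ((pvIdx w.toList).getD y []).filter (fun j => decide (i < j))))
          (fun j => j) false))
      else g.insert i ([] : List Int))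
      PySem.Dict.empty (PySem.List.pyRange 0 (w.toList.length : Int) 1)).items = _
  rw [hbody]
  rw [PySem.Dict.items_foldl_insert_fresh _ (fun i => i) (pvSB D w.toList) _ (fun a _ => rfl)
    (by simpa using PySem.List.nodup_pyRange_one 0 (w.toList.length : Int))]
  rfl

-- ===== VERDICT (by name: the statement is the Claim_ definition above) =====
theorem get_words_dependency_graph_spec : Claim_equal_get_words_dependency_graph := by
  intro D w _hdom _hpre
  unfold Spec_get_words_dependency_graph
  rw [pv_A_items, pv_B_items]
  apply List.map_congr_left
  intro i hi
  rcases (PySem.List.mem_pyRange_one.mp hi) with ⟨h0, hn⟩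
  exact congrArg (fun s => (i, s)) (pv_row_eq D w.toList i h0 hn)
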